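-- pv_equiv track=rewrite | github.com/PGM-CTEC/consulta-de-processos | backend/services/phase_analyzer.py | _has_only_g2_instances
-- ===== SOURCE A (Python) =====
-- from typing import List, Dict, Optional, Any, Tuple
--
-- def _has_only_g2_instances(all_instances: List[Dict[str, Any]]) -> bool:
--     """
--     Retorna True se há pelo menos uma instância G2/TR e nenhuma G1/JE.
--     Indica que o DataJud não retornou dados de 1ª instância.
--     """
--     has_g2 = False
--     for inst in all_instances:
--         grau_str = (inst.get("grau", "") or "").upper()
--         if grau_str in ("G2", "TR"):
--             has_g2 = True
--         elif grau_str in ("G1", "JE"):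
--             return False
--     return has_g2
-- ===== SOURCE B (Python) =====
-- from typing import List, Dict, Any
--
-- def _has_only_g2_instances(all_instances: List[Dict[str, Any]]) -> bool:
--     grades = [(inst.get("grau", "") or "").upper() for inst in all_instances]
--     return any(g in ("G2", "TR") for g in grades) and not any(g in ("G1", "JE") for g in grades)
-- ===== Notes on version B (the rewrite author's own statement) =====
-- stated objective: simpler
-- what changed: Replaces A's single fused early-exit loop with stateful flag by a normalize-once comprehension followed by two independent any() passes (exists G2/TR and not exists G1/JE), relying on order-independence of the result.
import Mathlib
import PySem

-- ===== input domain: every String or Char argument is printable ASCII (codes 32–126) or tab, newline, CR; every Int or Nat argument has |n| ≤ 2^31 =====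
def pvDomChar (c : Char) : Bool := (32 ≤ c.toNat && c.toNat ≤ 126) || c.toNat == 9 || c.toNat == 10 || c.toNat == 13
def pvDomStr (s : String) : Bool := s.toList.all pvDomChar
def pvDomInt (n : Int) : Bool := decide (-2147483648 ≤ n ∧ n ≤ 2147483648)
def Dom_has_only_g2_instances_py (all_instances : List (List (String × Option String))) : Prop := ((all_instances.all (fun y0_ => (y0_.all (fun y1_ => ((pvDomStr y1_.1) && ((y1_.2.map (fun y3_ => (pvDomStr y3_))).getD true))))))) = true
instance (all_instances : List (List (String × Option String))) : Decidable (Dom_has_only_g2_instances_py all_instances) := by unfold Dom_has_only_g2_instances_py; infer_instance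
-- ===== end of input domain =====

-- B replaces A's fused early-exit loop with a normalize-once pass and two independent `any` scans (simpler decomposition; same cost).

-- shared normalization: (inst.get("grau", "") or "").upper()  (both Pythons use this identical expression)
def grauUpper (inst : List (String × Option String)) : String :=
  PySem.Str.upper (match (PySem.Dict.mk inst).get? "grau" with
    | some (some s) => s
    | _ => "")

-- ===== PORT A =====
def hasOnlyG2Loop (has_g2 : Bool) : List (List (String × Option String)) → Bool
  | [] => has_g2
  | inst :: rest =>
    let grau_str := grauUpper inst
    if grau_str = "G2" ∨ grau_str = "TR" then hasOnlyG2Loop true rest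
    else if grau_str = "G1" ∨ grau_str = "JE" then false
    else hasOnlyG2Loop has_g2 rest

def has_only_g2_instances_py (all_instances : List (List (String × Option String))) : Bool :=
  hasOnlyG2Loop false all_instances

-- ===== PORT B =====
def has_only_g2_instances_py_alt (all_instances : List (List (String × Option String))) : Bool :=
  let grades := all_instances.map grauUpper
  (grades.any (fun g => g = "G2" ∨ g = "TR")) && !(grades.any (fun g => g = "G1" ∨ g = "JE"))

-- ===== PRECONDITION & SPEC =====
def Spec_has_only_g2_instances_py (all_instances : List (List (String × Option String))) (out : Bool) : Prop := out = has_only_g2_instances_py_alt all_instances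
instance (all_instances : List (List (String × Option String))) (out : Bool) : Decidable (Spec_has_only_g2_instances_py all_instances out) := by unfold Spec_has_only_g2_instances_py; infer_instance

-- ===== CLAIM (what is proved, stated in full; the proofs are below) =====
def Claim_equal_has_only_g2_instances_py : Prop := ∀ (all_instances : List (List (String × Option String))), Dom_has_only_g2_instances_py all_instances → Spec_has_only_g2_instances_py all_instances (has_only_g2_instances_py all_instances)

-- ===== LEMMAS AND PROOFS =====
theorem hasOnlyG2Loop_eq (b : Bool) (l : List (List (String × Option String))) :
    hasOnlyG2Loop b l =
      ((b || l.any (fun inst => decide (grauUpper inst = "G2" ∨ grauUpper inst = "TR"))) &&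
        !(l.any (fun inst => decide (grauUpper inst = "G1" ∨ grauUpper inst = "JE")))) := by
  induction l generalizing b with
  | nil => simp [hasOnlyG2Loop]
  | cons inst rest ih =>
    simp only [hasOnlyG2Loop, List.any_cons]
    split_ifs with h1 h2
    · have hne : ¬ (grauUpper inst = "G1" ∨ grauUpper inst = "JE") := by
        rcases h1 with h | h <;> simp [h]
      simp [ih, h1, hne]
    · simp [h2]
    · simp [ih, h1, h2]

-- ===== VERDICT (by name: the statement is the Claim_ definition above) =====
theorem has_only_g2_instances_py_spec : Claim_equal_has_only_g2_instances_py := by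
  intro all_instances _
  unfold Spec_has_only_g2_instances_py has_only_g2_instances_py has_only_g2_instances_py_alt
  rw [hasOnlyG2Loop_eq]
  simp [List.any_map, Function.comp_def]
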